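-- pv_equiv track=rewrite | github.com/HuangZhuo/csv2lua | idsub.py | subCell
-- ===== SOURCE A (Python) =====
-- def subCell(cell, mapping):
--     if cell in mapping:
--         return mapping[cell]
--     else:
--         cells = cell.split(';')
--         if len(cells) > 1:
--             cells = [subCell(v, mapping) for v in cells]
--             return ';'.join(cells)
--         else:
--             return cell
-- ===== SOURCE B (Python) =====
-- def subCell(cell, mapping):
--     if cell in mapping:
--         return mapping[cell]
--     cells = cell.split(';')
--     if len(cells) > 1:
--         return ';'.join(mapping.get(v, v) for v in cells)
--     return cell
-- ===== Notes on version B (the rewrite author's own statement) =====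
-- stated objective: simpler
-- what changed: The recursive list comprehension (one degenerate level of recursion per part) is replaced by a flat non-recursive per-part dict lookup mapping.get(v, v); the whole-cell lookup before the split is kept.
import Mathlib
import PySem

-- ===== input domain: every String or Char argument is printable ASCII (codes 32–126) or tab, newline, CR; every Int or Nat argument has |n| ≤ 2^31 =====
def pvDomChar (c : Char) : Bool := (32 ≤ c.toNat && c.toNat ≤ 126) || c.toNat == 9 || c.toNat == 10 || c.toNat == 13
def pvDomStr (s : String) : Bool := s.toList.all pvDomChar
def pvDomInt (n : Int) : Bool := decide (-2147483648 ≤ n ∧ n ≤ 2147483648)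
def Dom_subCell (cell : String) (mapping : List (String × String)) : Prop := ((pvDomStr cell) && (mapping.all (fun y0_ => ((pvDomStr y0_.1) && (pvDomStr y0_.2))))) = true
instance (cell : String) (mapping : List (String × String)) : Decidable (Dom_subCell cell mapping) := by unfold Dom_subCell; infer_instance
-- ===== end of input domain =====

-- B replaces A's one-level recursive comprehension over the split parts by a flat
-- non-recursive per-part dict lookup (mapping.get(v, v)); objective: simpler.

-- ===== PORT A =====
-- A's recursion, fuel-guarded for totality only (fuel = |cell| + 1 always suffices:
-- parts of a split never contain ';', so recursion depth is at most 2).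
def subCellRec (fuel : Nat) (cell : List Char) (d : PySem.Dict (List Char) (List Char)) : List Char :=
  match fuel with
  | 0 => cell
  | fuel + 1 =>
    if d.contains cell then (d.get? cell).getD cell  -- mapping[cell]; guard ensures the key is present
    else
      let cells := PySem.Chars.splitOn cell [';']
      if cells.length > 1 then
        PySem.Chars.join [';'] (cells.map (fun v => subCellRec fuel v d))
      else cell

def subCell (cell : String) (mapping : List (String × String)) : String :=
  String.ofList (subCellRec (cell.toList.length + 1) cell.toList
    (PySem.Dict.ofList (mapping.map (fun p => (p.1.toList, p.2.toList)))))

-- ===== PORT B =====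
def subCell_alt (cell : String) (mapping : List (String × String)) : String :=
  let d := PySem.Dict.ofList (mapping.map (fun p => (p.1.toList, p.2.toList)))
  match d.get? cell.toList with
  | some v => String.ofList v
  | none =>
    let cells := PySem.Chars.splitOn cell.toList [';']
    if cells.length > 1 then
      String.ofList (PySem.Chars.join [';'] (cells.map (fun v => d.getD v v)))
    else cell

-- ===== PRECONDITION & SPEC =====
def Spec_subCell (cell : String) (mapping : List (String × String)) (out : String) : Prop := out = subCell_alt cell mapping
instance (cell : String) (mapping : List (String × String)) (out : String) : Decidable (Spec_subCell cell mapping out) := by unfold Spec_subCell; infer_instance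

-- ===== CLAIM (what is proved, stated in full; the proofs are below) =====
def Claim_equal_subCell : Prop := ∀ (cell : String) (mapping : List (String × String)), Dom_subCell cell mapping → Spec_subCell cell mapping (subCell cell mapping)

-- ===== LEMMAS AND PROOFS =====

theorem dict_contains_iff_get? {κ ν : Type} [BEq κ] (d : PySem.Dict κ ν) (k : κ) :
    d.contains k = true ↔ (d.get? k).isSome := by
  simp [PySem.Dict.contains, PySem.Dict.get?, Option.isSome_map, List.find?_isSome,
    List.any_eq_true]

theorem splitOn_go_no_sep (c : Char) (fuel : Nat) (l cur : List Char)
    (acc : List (List Char)) (hl : l.length ≤ fuel) (hcur : c ∉ cur)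
    (hacc : ∀ q ∈ acc, c ∉ q) :
    ∀ p ∈ PySem.Chars.splitOn.go [c] fuel l cur acc, c ∉ p := by
  induction fuel generalizing l cur acc with
  | zero =>
    have : l = [] := List.eq_nil_of_length_eq_zero (Nat.le_zero.mp hl)
    subst this
    intro p hp
    simp only [PySem.Chars.splitOn.go, List.mem_reverse, List.mem_cons] at hp
    rcases hp with h | h
    · subst h; simpa using hcur
    · exact hacc p h
  | succ fuel ih =>
    intro p hp
    match l with
    | [] =>
      simp only [PySem.Chars.splitOn.go, List.mem_reverse, List.mem_cons] at hp
      rcases hp with h | h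
      · subst h; simpa using hcur
      · exact hacc p h
    | ch :: rest =>
      rw [PySem.Chars.splitOn.go] at hp
      by_cases hpre : [c].isPrefixOf (ch :: rest) = true
      · rw [if_pos hpre] at hp
        refine ih (List.drop 1 (ch :: rest)) [] (cur.reverse :: acc) ?_ (by simp) ?_ p hp
        · simpa using Nat.le_of_succ_le_succ hl
        · intro q hq
          rcases List.mem_cons.mp hq with h | h
          · subst h; simpa using hcur
          · exact hacc q h
      · rw [if_neg hpre] at hp
        have hch : ch ≠ c := by
          simp only [List.isPrefixOf, and_true, beq_iff_eq,
            Bool.and_eq_true] at hpre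
          intro h; exact hpre h.symm
        refine ih rest (ch :: cur) acc (Nat.le_of_succ_le_succ hl) ?_ hacc p hp
        intro h
        rcases List.mem_cons.mp h with h | h
        · exact hch h.symm
        · exact hcur h

theorem splitOn_go_of_no_sep (c : Char) (fuel : Nat) (l cur : List Char)
    (acc : List (List Char)) (hl : c ∉ l) :
    PySem.Chars.splitOn.go [c] fuel l cur acc = ((cur.reverse ++ l) :: acc).reverse := by
  induction fuel generalizing l cur with
  | zero => rw [PySem.Chars.splitOn.go]
  | succ fuel ih =>
    match l with
    | [] =>
      rw [PySem.Chars.splitOn.go]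
      · simp
      · omega
    | ch :: rest =>
      have hch : ch ≠ c := fun h => hl (h ▸ List.mem_cons_self ..)
      have hpre : [c].isPrefixOf (ch :: rest) = false := by
        simp [List.isPrefixOf]
        exact fun h => hch h.symm
      rw [PySem.Chars.splitOn.go, hpre]
      simp only [Bool.false_eq_true, if_false]
      rw [ih rest (ch :: cur) (fun h => hl (List.mem_cons_of_mem _ h))]
      simp

theorem splitOn_of_no_sep (c : Char) (l : List Char) (hl : c ∉ l) :
    PySem.Chars.splitOn l [c] = [l] := by
  rw [PySem.Chars.splitOn, splitOn_go_of_no_sep c _ _ _ _ hl]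
  simp

theorem splitOn_nil (c : Char) : PySem.Chars.splitOn [] [c] = [[]] :=
  splitOn_of_no_sep c [] (by simp)

theorem subCellRec_part (fuel : Nat) (v : List Char)
    (d : PySem.Dict (List Char) (List Char)) (hv : (';' : Char) ∉ v) :
    subCellRec (fuel + 1) v d = d.getD v v := by
  rw [subCellRec]
  by_cases hc : d.contains v = true
  · rw [if_pos hc, PySem.Dict.getD]
  · rw [if_neg hc]
    have hget : d.get? v = none := by
      cases hg : d.get? v with
      | none => rfl
      | some w => exact absurd ((dict_contains_iff_get? d v).mpr (by simp [hg])) hc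
    simp [splitOn_of_no_sep ';' v hv, PySem.Dict.getD, hget]

theorem subCell_eq_alt (cell : String) (mapping : List (String × String)) :
    subCell cell mapping = subCell_alt cell mapping := by
  rw [subCell, subCell_alt]
  set d := PySem.Dict.ofList (mapping.map (fun p => (p.1.toList, p.2.toList))) with hd
  cases hg : d.get? cell.toList with
  | some v =>
    have hc : d.contains cell.toList = true :=
      (dict_contains_iff_get? d cell.toList).mpr (by simp [hg])
    rw [subCellRec, if_pos hc, hg]
    rfl
  | none =>
    have hc : d.contains cell.toList = false := by
      by_contra h
      have := (dict_contains_iff_get? d cell.toList).mp (by simpa using h)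
      rw [hg] at this; exact absurd this (by simp)
    rw [subCellRec, if_neg (by simp [hc])]
    simp only
    by_cases hlen : (PySem.Chars.splitOn cell.toList [';']).length > 1
    · rw [if_pos hlen, if_pos hlen]
      have hne : cell.toList ≠ [] := by
        intro h
        rw [h, splitOn_nil] at hlen
        simp at hlen
      obtain ⟨ch, rest, hcr⟩ := List.exists_cons_of_ne_nil hne
      have hfuel : ∃ f, cell.toList.length = f + 1 := ⟨rest.length, by rw [hcr]; simp⟩
      obtain ⟨f, hf⟩ := hfuel
      rw [hf]
      apply congrArg
      apply congrArg
      apply List.map_congr_left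
      intro v hv
      have hnosep : (';' : Char) ∉ v := by
        refine splitOn_go_no_sep ';' (cell.toList.length + 1) cell.toList [] [] ?_ (by simp) (by simp) v ?_
        · omega
        · rw [PySem.Chars.splitOn] at hv; exact hv
      exact subCellRec_part f v d hnosep
    · rw [if_neg hlen, if_neg hlen]
      exact String.ofList_toList

-- ===== VERDICT (by name: the statement is the Claim_ definition above) =====
theorem subCell_spec : Claim_equal_subCell := by
  intro cell mapping _
  unfold Spec_subCell
  exact subCell_eq_alt cell mapping
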